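-- pv_equiv track=rewrite | github.com/KYUSEONGHAN/Development | 하루에 한개씩 문제 풀기/Python/Programmers/모든 문제/Level 0/컨트롤 제트.py | solution
-- ===== SOURCE A (Python) =====
-- def solution(s: str) -> int:
--     answer = []
--
--     for x in s.split():
--         if x != 'Z':
--             answer.append(int(x))
--         else:
--             if answer:
--                 answer.pop()
--
--     return sum(answer)
-- ===== SOURCE B (Python) =====
-- def solution(s: str) -> int:
--     total = 0
--     skip = 0
--     for x in reversed(s.split()):
--         if x == 'Z':
--             skip += 1
--         else:
--             v = int(x)
--             if skip:
--                 skip -= 1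
--             else:
--                 total += v
--     return total
-- ===== Notes on version B (the rewrite author's own statement) =====
-- stated objective: alternative
-- what changed: Replaces the explicit stack (append/pop, then sum) by a single reversed scan that maintains only an integer skip counter and a running total: an undo token increments skip, a number is dropped while skip>0, otherwise added.
import Mathlib
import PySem

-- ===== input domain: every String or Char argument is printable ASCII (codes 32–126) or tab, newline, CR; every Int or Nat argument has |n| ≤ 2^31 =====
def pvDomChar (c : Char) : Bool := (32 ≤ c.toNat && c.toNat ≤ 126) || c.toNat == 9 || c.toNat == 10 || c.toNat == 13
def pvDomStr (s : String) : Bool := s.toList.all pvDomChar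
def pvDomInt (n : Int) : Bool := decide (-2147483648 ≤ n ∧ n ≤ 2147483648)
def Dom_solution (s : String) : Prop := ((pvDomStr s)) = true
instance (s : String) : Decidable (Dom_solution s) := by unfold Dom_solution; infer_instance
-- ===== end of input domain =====

-- B replaces A's explicit stack by a reversed scan with a skip counter and a running total (alternative decomposition, O(1) extra space).

-- ===== PORT A =====
-- int(x) is PySem.Int.ofStr?; the none case (ValueError) is excluded by Pre_solution, so .getD 0 is never taken there.
def pvStepA (answer : List Int) (x : String) : List Int :=
  if x ≠ "Z" then answer ++ [(PySem.Int.ofStr? x).getD 0]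
  else if answer ≠ [] then answer.dropLast else answer

def solution (s : String) : Int :=
  ((PySem.Str.split₀ s).foldl pvStepA []).sum

-- ===== PORT B =====
-- state = (total, skip), exactly Source B's two variables; loop over reversed(s.split())
def pvStepB (acc : Int × Int) (x : String) : Int × Int :=
  if x == "Z" then (acc.1, acc.2 + 1)
  else
    let v := (PySem.Int.ofStr? x).getD 0
    if acc.2 ≠ 0 then (acc.1, acc.2 - 1) else (acc.1 + v, acc.2)

def solution_alt (s : String) : Int :=
  (((PySem.Str.split₀ s).reverse).foldl pvStepB (0, 0)).1

-- ===== PRECONDITION & SPEC =====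
-- Pre_ excludes exactly the inputs on which Python A raises ValueError: a whitespace token that is neither the undo token nor an int literal.
def Pre_solution (s : String) : Prop :=
  (PySem.Str.split₀ s).all (fun x => x == "Z" || (PySem.Int.ofStr? x).isSome) = true
instance (s : String) : Decidable (Pre_solution s) := by unfold Pre_solution; infer_instance
def pvWitness_solution : String := "1 2 Z 3"

def Spec_solution (s : String) (out : Int) : Prop := out = solution_alt s
instance (s : String) (out : Int) : Decidable (Spec_solution s out) := by unfold Spec_solution; infer_instance

-- ===== CLAIM (what is proved, stated in full; the proofs are below) =====
def Claim_equal_solution : Prop := ∀ (s : String), Dom_solution s → Pre_solution s → Spec_solution s (solution s)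

-- ===== LEMMAS AND PROOFS =====

-- proof-side abbreviation: B's reversed foldl, read as a foldr over the token list
def pvBrun (ts : List String) : Int × Int := ts.foldr (fun x y => pvStepB y x) (0, 0)

lemma pvBrun_cons (x : String) (rest : List String) :
    pvBrun (x :: rest) = pvStepB (pvBrun rest) x := rfl

lemma pvB_skip_nonneg (ts : List String) : 0 ≤ (pvBrun ts).2 := by
  induction ts with
  | nil => simp [pvBrun]
  | cons x rest ih =>
    rw [pvBrun_cons]
    rcases hE : pvBrun rest with ⟨t, k⟩
    rw [hE] at ih
    simp only at ih
    simp only [pvStepB]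
    split_ifs <;> simp_all <;> omega

-- Invariant: A's run from stack `st` sums to B's total plus the part of `st` surviving B's leftover skips.
lemma pvKey (ts : List String) (st : List Int) :
    ((ts.foldl pvStepA st).sum : Int) =
      (pvBrun ts).1 + (st.take (st.length - (pvBrun ts).2.toNat)).sum := by
  induction ts generalizing st with
  | nil => simp [pvBrun]
  | cons x rest ih =>
    have hk := pvB_skip_nonneg rest
    rw [pvBrun_cons, List.foldl_cons]
    rcases hE : pvBrun rest with ⟨t, k⟩
    rw [hE] at ih hk
    simp only at hk
    by_cases hZ : x = "Z"
    · subst hZ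
      have hA : pvStepA st "Z" = if st ≠ [] then st.dropLast else st := by
        simp [pvStepA]
      have hB : pvStepB (t, k) "Z" = (t, k + 1) := by simp [pvStepB]
      rw [hA, hB, ih]
      by_cases hst : st = []
      · subst hst; simp
      · rw [if_pos hst]
        simp only
        congr 2
        rw [List.dropLast_eq_take, List.take_take, List.length_take]
        congr 1
        omega
    · have hbeq : (x == "Z") = false := by simpa using hZ
      have hA : pvStepA st x = st ++ [(PySem.Int.ofStr? x).getD 0] := by
        simp [pvStepA, hZ]
      rw [hA, ih]
      by_cases hk0 : k = 0
      · subst hk0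
        have hB : pvStepB (t, 0) x = (t + (PySem.Int.ofStr? x).getD 0, 0) := by
          simp [pvStepB, hbeq]
        rw [hB]
        simp only [Int.toNat_zero, Nat.sub_zero, List.take_length, List.sum_append,
          List.sum_cons, List.sum_nil]
        ring
      · have hB : pvStepB (t, k) x = (t, k - 1) := by
          simp [pvStepB, hbeq, hk0]
        rw [hB]
        simp only
        congr 2
        have h1 : 1 ≤ k.toNat := by omega
        have h2 : (k - 1).toNat = k.toNat - 1 := by omega
        rw [List.take_append_of_le_length (by simp; omega)]
        congr 1
        simp [h2]; omega

-- ===== VERDICT (by name: the statement is the Claim_ definition above) =====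
theorem solution_spec : Claim_equal_solution := by
  intro s _ _
  unfold Spec_solution solution solution_alt
  rw [List.foldl_reverse]
  rw [pvKey (PySem.Str.split₀ s) []]
  simp [pvBrun]
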